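-- pv_equiv track=rewrite | github.com/asteinig4018/mhacks19 | dictionarysort.py | classify_tweet
-- ===== SOURCE A (Python) =====
-- def classify_tweet(tweet, arr):#function declaration
--     tweet = tweet.lower()#lower case the tweet
--
--     Lcount = 0#initiate counters
--     Ccount = 0
--
--     for element in arr:#loop through every word of dictionary
--         location = tweet.find(element[0])#see if the tweet contatins the word
--         if (location != -1):
--             if(element[1]=='l'):
--                 Lcount += 1
--             if(element[1]=='c'):
--                 Ccount += 1
--     if(Lcount > Ccount):#return the max of the types of words
--         return 'l'
--     elif(Ccount > Lcount):
--         return 'c'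
--     elif(Ccount == Lcount):
--         return 'n'
-- ===== SOURCE B (Python) =====
-- def classify_tweet(tweet, arr):
--     # Tweet-driven multi-pattern matching: scan the tweet positions once,
--     # collecting the set of dictionary patterns that occur, then tally labels.
--     t = tweet.lower()
--     pats = set(p for p, _ in arr)
--     matched = set()
--     for i in range(len(t) + 1):
--         for p in pats:
--             if p not in matched and t[i:].startswith(p):
--                 matched.add(p)
--     l = sum(1 for p, lab in arr if lab == 'l' and p in matched)
--     c = sum(1 for p, lab in arr if lab == 'c' and p in matched)
--     return 'l' if l > c else 'c' if c > l else 'n'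
-- ===== Notes on version B (the rewrite author's own statement) =====
-- stated objective: alternative
-- what changed: B inverts the traversal: instead of A's dictionary-driven loop calling tweet.find per entry, B does one tweet-position-driven matching pass (for each position, test which not-yet-matched patterns start there) building a matched-pattern set, then tallies the 'l'/'c' labels over arr in two staged count passes and compares them.
import Mathlib
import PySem

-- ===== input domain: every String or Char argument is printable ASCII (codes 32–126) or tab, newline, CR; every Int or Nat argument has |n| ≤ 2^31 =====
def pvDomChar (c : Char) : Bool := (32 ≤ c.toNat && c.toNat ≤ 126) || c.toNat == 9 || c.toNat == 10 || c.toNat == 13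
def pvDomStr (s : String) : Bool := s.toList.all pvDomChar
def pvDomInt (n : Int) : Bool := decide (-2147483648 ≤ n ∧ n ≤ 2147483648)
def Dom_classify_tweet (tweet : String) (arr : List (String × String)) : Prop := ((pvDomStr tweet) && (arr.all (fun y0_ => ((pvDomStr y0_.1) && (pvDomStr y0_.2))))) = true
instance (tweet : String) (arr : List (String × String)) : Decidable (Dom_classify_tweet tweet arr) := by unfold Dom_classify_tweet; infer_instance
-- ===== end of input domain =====

-- B inverts the traversal: one pass over tweet positions building the set of matched
-- patterns, then two staged label-count passes over arr (objective: alternative).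

-- ===== PORT A =====
def classify_tweet (tweet : String) (arr : List (String × String)) : String :=
  let t := PySem.Str.lower tweet
  let lc := arr.foldl (fun (st : Int × Int) element =>
    let location := PySem.Str.find t element.1
    if location ≠ -1 then
      let st := if element.2 == "l" then (st.1 + 1, st.2) else st
      let st := if element.2 == "c" then (st.1, st.2 + 1) else st
      st
    else st) (0, 0)
  if lc.1 > lc.2 then "l"
  else if lc.2 > lc.1 then "c"
  else "n"

-- ===== PORT B =====
def classify_tweet_alt (tweet : String) (arr : List (String × String)) : String :=
  let t := PySem.Str.lower tweet
  let pats : PySem.Set String := PySem.Set.ofList (arr.map (·.1))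
  let matched : PySem.Set String :=
    (PySem.List.pyRange 0 (PySem.Str.len t + 1) 1).foldl (fun m i =>
      pats.foldl (fun (m : PySem.Set String) p =>
        if !(PySem.Set.contains m p) && PySem.Str.startswith (PySem.Str.slice t (some i) none) p
        then PySem.Set.add m p else m) m) PySem.Set.empty
  let l : Int := arr.foldl (fun n e =>
    if e.2 == "l" && PySem.Set.contains matched e.1 then n + 1 else n) 0
  let c : Int := arr.foldl (fun n e =>
    if e.2 == "c" && PySem.Set.contains matched e.1 then n + 1 else n) 0
  if l > c then "l" else if c > l then "c" else "n"

-- ===== PRECONDITION & SPEC =====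
def Spec_classify_tweet (tweet : String) (arr : List (String × String)) (out : String) : Prop := out = classify_tweet_alt tweet arr
instance (tweet : String) (arr : List (String × String)) (out : String) : Decidable (Spec_classify_tweet tweet arr out) := by unfold Spec_classify_tweet; infer_instance

-- ===== CLAIM (what is proved, stated in full; the proofs are below) =====
def Claim_equal_classify_tweet : Prop := ∀ (tweet : String) (arr : List (String × String)), Dom_classify_tweet tweet arr → Spec_classify_tweet tweet arr (classify_tweet tweet arr)

-- ===== LEMMAS AND PROOFS =====

-- A's per-element step, named for the induction
def pvStepA (t : String) (st : Int × Int) (element : String × String) : Int × Int :=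
  let location := PySem.Str.find t element.1
  if location ≠ -1 then
    let st := if element.2 == "l" then (st.1 + 1, st.2) else st
    let st := if element.2 == "c" then (st.1, st.2 + 1) else st
    st
  else st

-- B's matching primitives, named for the induction
def pvSW (t : String) (i : Int) (p : String) : Bool :=
  PySem.Str.startswith (PySem.Str.slice t (some i) none) p

def pvInnerStep (t : String) (i : Int) (m : PySem.Set String) (p : String) : PySem.Set String :=
  if !(PySem.Set.contains m p) && pvSW t i p then PySem.Set.add m p else m

def pvMatched (t : String) (pats : List String) : PySem.Set String :=
  (PySem.List.pyRange 0 (PySem.Str.len t + 1) 1).foldl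
    (fun m i => pats.foldl (pvInnerStep t i) m) PySem.Set.empty

theorem pvA_eq (tweet : String) (arr : List (String × String)) :
    classify_tweet tweet arr =
      (if (arr.foldl (pvStepA (PySem.Str.lower tweet)) (0, 0)).1 >
            (arr.foldl (pvStepA (PySem.Str.lower tweet)) (0, 0)).2 then "l"
       else if (arr.foldl (pvStepA (PySem.Str.lower tweet)) (0, 0)).2 >
            (arr.foldl (pvStepA (PySem.Str.lower tweet)) (0, 0)).1 then "c"
       else "n") := rfl

theorem pvB_eq (tweet : String) (arr : List (String × String)) :
    classify_tweet_alt tweet arr =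
      (let matched := pvMatched (PySem.Str.lower tweet) (PySem.Set.ofList (arr.map (·.1)))
       let l : Int := arr.foldl (fun n e =>
         if e.2 == "l" && PySem.Set.contains matched e.1 then n + 1 else n) 0
       let c : Int := arr.foldl (fun n e =>
         if e.2 == "c" && PySem.Set.contains matched e.1 then n + 1 else n) 0
       if l > c then "l" else if c > l then "c" else "n") := rfl

theorem pv_mem_inner (t : String) (i : Int) (pats : List String) :
    ∀ (m : PySem.Set String) (q : String),
      q ∈ pats.foldl (pvInnerStep t i) m ↔ q ∈ m ∨ (q ∈ pats ∧ pvSW t i q = true) := by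
  induction pats with
  | nil => intro m q; simp
  | cons p ps ih =>
    intro m q
    simp only [List.foldl_cons, ih, List.mem_cons]
    unfold pvInnerStep
    split_ifs with h
    · have hsw : pvSW t i p = true := by
        have := h
        simp only [Bool.and_eq_true] at this
        exact this.2
      simp only [PySem.Set.mem_add]
      by_cases hq : q = p
      · subst hq; simp [hsw]
      · simp [hq]
    · have h' : p ∈ m ∨ pvSW t i p ≠ true := by
        by_cases hm : p ∈ m
        · exact Or.inl hm
        · refine Or.inr (fun hsw => h ?_)
          simp [PySem.Set.contains, hm, hsw]
      by_cases hq : q = p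
      · subst hq
        rcases h' with hm | hsw
        · simp [hm]
        · simp [hsw]
      · simp [hq]

theorem pv_mem_outer (t : String) (pats : List String) :
    ∀ (rs : List Int) (m : PySem.Set String) (q : String),
      q ∈ rs.foldl (fun m i => pats.foldl (pvInnerStep t i) m) m ↔
        q ∈ m ∨ ∃ i ∈ rs, q ∈ pats ∧ pvSW t i q = true := by
  intro rs
  induction rs with
  | nil => intro m q; simp
  | cons r rest ih =>
    intro m q
    simp only [List.foldl_cons, ih, pv_mem_inner, List.mem_cons]
    constructor
    · rintro (( hm | h) | ⟨i, hi, h⟩)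
      · exact Or.inl hm
      · exact Or.inr ⟨r, Or.inl rfl, h⟩
      · exact Or.inr ⟨i, Or.inr hi, h⟩
    · rintro (hm | ⟨i, (rfl | hi), h⟩)
      · exact Or.inl (Or.inl hm)
      · exact Or.inl (Or.inr h)
      · exact Or.inr ⟨i, hi, h⟩

theorem pv_sw_iff (t q : String) (i : Int) (h : 0 ≤ i) :
    pvSW t i q = true ↔ q.toList <+: t.toList.drop i.toNat := by
  unfold pvSW
  rw [PySem.Str.startswith_eq, PySem.Chars.startswith_iff, PySem.Str.toList_slice,
    PySem.Chars.slice_eq_listSlice, PySem.List.slice_from t.toList h]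

theorem pv_exists_iff (t q : String) :
    (∃ i ∈ PySem.List.pyRange 0 (PySem.Str.len t + 1) 1, pvSW t i q = true) ↔
      PySem.Str.isIn q t = true := by
  have hlen : PySem.Str.len t = (t.toList.length : Int) := PySem.Str.len_eq t
  rw [PySem.Str.isIn_eq, ← PySem.Chars.exists_prefix_drop_iff_isIn]
  constructor
  · rintro ⟨i, hi, hsw⟩
    have h0 := PySem.List.mem_pyRange_one.mp hi
    exact ⟨i.toNat, (pv_sw_iff t q i h0.1).mp hsw⟩
  · rintro ⟨j, hj⟩
    by_cases hle : (j : Int) ≤ PySem.Str.len t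
    · refine ⟨(j : Int), PySem.List.mem_pyRange_one.mpr ⟨by positivity, by omega⟩, ?_⟩
      rw [pv_sw_iff t q _ (by positivity)]
      simpa using hj
    · have hbig : t.toList.length ≤ j := by omega
      have hnil : t.toList.drop j = [] := List.drop_eq_nil_of_le hbig
      have hq : q.toList = [] := List.prefix_nil.mp (hnil ▸ hj)
      refine ⟨PySem.Str.len t, PySem.List.mem_pyRange_one.mpr ⟨by omega, by omega⟩, ?_⟩
      rw [pv_sw_iff t q _ (by omega)]
      simp [hq]

theorem pv_mem_matched (t : String) (xs : List String) (q : String) :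
    q ∈ pvMatched t (PySem.Set.ofList xs) ↔ q ∈ xs ∧ PySem.Str.isIn q t = true := by
  unfold pvMatched
  rw [pv_mem_outer]
  simp only [PySem.Set.empty, List.not_mem_nil, false_or, PySem.Set.mem_ofList]
  constructor
  · rintro ⟨i, hi, hq, hsw⟩
    exact ⟨hq, (pv_exists_iff t q).mp ⟨i, hi, hsw⟩⟩
  · rintro ⟨hq, hin⟩
    obtain ⟨i, hi, hsw⟩ := (pv_exists_iff t q).mpr hin
    exact ⟨i, hi, hq, hsw⟩

theorem pv_foldA (t : String) (arr : List (String × String)) :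
    ∀ st : Int × Int,
      arr.foldl (pvStepA t) st =
        (st.1 + (arr.countP (fun e => decide (PySem.Str.find t e.1 ≠ -1) && (e.2 == "l")) : Int),
         st.2 + (arr.countP (fun e => decide (PySem.Str.find t e.1 ≠ -1) && (e.2 == "c")) : Int)) := by
  induction arr with
  | nil => intro st; simp
  | cons e rest ih =>
    intro st
    simp only [List.foldl_cons, ih, List.countP_cons]
    by_cases hf : PySem.Chars.find t.toList e.1.toList = -1
    · simp [pvStepA, hf]
    · by_cases hl : e.2 = "l"
      · simp only [pvStepA, Prod.ext_iff]
        simp [hf, hl, show (("l" : String) == "c") = false from by decide]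
        omega
      · by_cases hc : e.2 = "c"
        · simp only [pvStepA, Prod.ext_iff]
          simp [hf, hc, show (("c" : String) == "l") = false from by decide]
          omega
        · simp [pvStepA, hf, hl, hc]

-- ===== VERDICT (by name: the statement is the Claim_ definition above) =====
theorem classify_tweet_spec : Claim_equal_classify_tweet := by
  intro tweet arr _
  unfold Spec_classify_tweet
  rw [pvA_eq, pvB_eq]
  simp only []
  set t := PySem.Str.lower tweet with ht
  set matched := pvMatched t (PySem.Set.ofList (arr.map (·.1))) with hmatched
  have hcont : ∀ e ∈ arr, ∀ lab : String,
      ((decide (PySem.Str.find t e.1 ≠ -1) && (e.2 == lab)) = true ↔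
        ((e.2 == lab) && PySem.Set.contains matched e.1) = true) := by
    intro e he lab
    have hmem : e.1 ∈ arr.map (·.1) := List.mem_map_of_mem he
    have hiff : PySem.Str.find t e.1 ≠ -1 ↔ PySem.Str.isIn e.1 t = true := by
      rw [PySem.Str.find_ne_neg_one_iff, PySem.Str.isIn_iff_infix]
    have hmc : PySem.Set.contains matched e.1 = true ↔ e.1 ∈ matched := by
      simp [PySem.Set.contains]
    rw [hmatched] at hmc ⊢
    simp only [Bool.and_eq_true, decide_eq_true_eq]
    rw [hmc, pv_mem_matched]
    constructor
    · rintro ⟨hf, hlab⟩; exact ⟨hlab, hmem, hiff.mp hf⟩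
    · rintro ⟨hlab, _, hin⟩; exact ⟨hiff.mpr hin, hlab⟩
  have hL : arr.foldl (fun n e =>
        if e.2 == "l" && PySem.Set.contains matched e.1 then n + 1 else n) 0 =
      (arr.countP (fun e => decide (PySem.Str.find t e.1 ≠ -1) && (e.2 == "l")) : Int) := by
    rw [PySem.List.foldl_count_if, List.countP_congr (fun e he => (hcont e he "l").symm)]
    ring
  have hC : arr.foldl (fun n e =>
        if e.2 == "c" && PySem.Set.contains matched e.1 then n + 1 else n) 0 =
      (arr.countP (fun e => decide (PySem.Str.find t e.1 ≠ -1) && (e.2 == "c")) : Int) := by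
    rw [PySem.List.foldl_count_if, List.countP_congr (fun e he => (hcont e he "c").symm)]
    ring
  rw [pv_foldA t arr (0, 0), hL, hC]
  norm_num
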